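-- pv_equiv track=rewrite | github.com/penzen/Python_Learning | Basics/Funtions.py | emp_month
-- ===== SOURCE A (Python) =====
-- def emp_month(tup):
--     itter = 0
--     emply = None
--     hours = 0
--
--     for x,y in tup:
--         if itter == 0: # unnessary step
--              hours = y
--              emply = x
--         elif itter != 0:
--             #another nested if statement.
--             if(hours > y):
--                 continue
--             else:
--                 hours = y
--                 emply = x
--         itter += 1
--
--     return emply, hours
-- ===== SOURCE B (Python) =====
-- def emp_month(tup):
--     if not tup:
--         return None, 0
--     return sorted(tup, key=lambda t: t[1])[-1]
-- ===== Notes on version B (the rewrite author's own statement) =====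
-- stated objective: simpler
-- what changed: Replaces the hand-rolled running-max loop (with its redundant iteration counter and nested branches) by a stable ascending sort on hours followed by taking the last element, which reproduces the last-on-ties maximum by stability.
-- outside the precondition, e.g. on emp_month([]): A returns (None, 0), B returns (None, 0)
import Mathlib
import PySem

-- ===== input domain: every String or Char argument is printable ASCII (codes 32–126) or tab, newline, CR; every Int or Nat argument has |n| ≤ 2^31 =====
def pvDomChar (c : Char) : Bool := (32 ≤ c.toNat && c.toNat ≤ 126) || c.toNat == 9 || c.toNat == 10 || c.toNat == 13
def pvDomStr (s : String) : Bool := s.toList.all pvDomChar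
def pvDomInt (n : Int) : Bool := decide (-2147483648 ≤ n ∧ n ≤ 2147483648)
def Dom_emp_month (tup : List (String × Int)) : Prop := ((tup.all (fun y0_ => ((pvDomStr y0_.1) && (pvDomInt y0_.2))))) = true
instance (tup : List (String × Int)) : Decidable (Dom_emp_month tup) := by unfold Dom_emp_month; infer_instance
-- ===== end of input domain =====

-- B replaces A's hand-rolled running-max loop by a stable ascending sort on hours plus
-- taking the last element (objective: simpler); equal return values on nonempty input.

-- ===== PORT A =====
-- state = (itter, emply, hours); 'continue' skips the trailing 'itter += 1'
def emp_month (tup : List (String × Int)) : String × Int :=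
  let s := tup.foldl
    (fun (st : Int × Option String × Int) (xy : String × Int) =>
      if st.1 == 0 then (st.1 + 1, some xy.1, xy.2)
      else if st.2.2 > xy.2 then st
      else (st.1 + 1, some xy.1, xy.2))
    (0, none, 0)
  -- Python returns (None, hours) when emply is still None (only on []); [] is outside Pre_
  (s.2.1.getD "", s.2.2)

-- ===== PORT B =====
def emp_month_alt (tup : List (String × Int)) : String × Int :=
  if tup = [] then ("", 0)  -- Source B returns (None, 0) here; [] is outside Pre_
  else (PySem.List.pyGet? (PySem.List.sorted tup (fun t => t.2)) (-1)).getD ("", 0)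

-- ===== PRECONDITION & SPEC =====
-- Pre_ excludes only the empty list, on which both Pythons return (None, 0): None is not a
-- value of the declared return type String × Int, so that input is outside the claim.
def Pre_emp_month (tup : List (String × Int)) : Prop := tup ≠ []
instance (tup : List (String × Int)) : Decidable (Pre_emp_month tup) := by unfold Pre_emp_month; infer_instance
def pvWitness_emp_month : (List (String × Int)) := [("a", 1)]

def Spec_emp_month (tup : List (String × Int)) (out : String × Int) : Prop := out = emp_month_alt tup
instance (tup : List (String × Int)) (out : String × Int) : Decidable (Spec_emp_month tup out) := by unfold Spec_emp_month; infer_instance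

-- ===== CLAIM (what is proved, stated in full; the proofs are below) =====
def Claim_equal_emp_month : Prop := ∀ (tup : List (String × Int)), Dom_emp_month tup → Pre_emp_month tup → Spec_emp_month tup (emp_month tup)

-- ===== LEMMAS AND PROOFS =====

-- the common "last maximum" step both proofs reduce to
def pvKeep (a b : String × Int) : String × Int := if a.2 > b.2 then a else b

-- A's loop body once itter has left 0: it computes pvKeep and keeps itter ≥ 1
theorem pvA_loop (t : List (String × Int)) :
    ∀ (i : Int) (e : String) (h : Int), 1 ≤ i →
    (List.foldl
      (fun (st : Int × Option String × Int) (xy : String × Int) =>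
        if st.1 == 0 then (st.1 + 1, some xy.1, xy.2)
        else if st.2.2 > xy.2 then st
        else (st.1 + 1, some xy.1, xy.2)) (i, some e, h) t).2
      = (some (List.foldl pvKeep (e, h) t).1, (List.foldl pvKeep (e, h) t).2) := by
  induction t with
  | nil => intro i e h hi; rfl
  | cons xy t ih =>
    intro i e h hi
    have hne : (i == 0) = false := by simp; omega
    simp only [List.foldl_cons, hne, Bool.false_eq_true, if_false]
    by_cases hgt : h > xy.2
    · simp only [hgt, if_pos, pvKeep, gt_iff_lt]
      have := ih i e h hi
      simpa [pvKeep] using this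
    · simp only [hgt, pvKeep, gt_iff_lt]
      have := ih (i + 1) xy.1 xy.2 (by omega)
      simpa [pvKeep, hgt] using this

-- structural unfolding of PySem.List.insertBy on a cons (cited by the getLast? lemma)
theorem pvInsertBy_cons (before : (String × Int) → (String × Int) → Bool) (x a : String × Int)
    (ys : List (String × Int)) :
    PySem.List.insertBy before x (a :: ys)
      = if before x a then x :: a :: ys else a :: PySem.List.insertBy before x ys := rfl

-- last element of an insertBy step into a key-sorted list
theorem pvInsert_getLast? (acc : List (String × Int)) :
    ∀ (x m : String × Int), acc.Pairwise (fun a b => a.2 ≤ b.2) → acc.getLast? = some m →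
    (PySem.List.insertBy (fun a b => decide (a.2 < b.2)) x acc).getLast? = some (pvKeep m x) := by
  induction acc with
  | nil => intro x m _ hl; simp at hl
  | cons a rest ih =>
    intro x m hp hl
    rw [pvInsertBy_cons]
    by_cases hx : x.2 < a.2
    · rw [if_pos (by simpa using hx)]
      have ham : a.2 ≤ m.2 := by
        rcases List.mem_cons.mp (List.mem_of_getLast? hl) with h | h
        · exact le_of_eq (congrArg Prod.snd h.symm)
        · exact (List.pairwise_cons.mp hp).1 m h
      have hk : pvKeep m x = m := by simp [pvKeep]; omega
      rw [hk, List.getLast?_cons_cons]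
      exact hl
    · rw [if_neg (by simpa using hx)]
      rcases rest with _ | ⟨b, rest'⟩
      · have ha : a = m := by simpa using hl
        subst ha
        simp [PySem.List.insertBy, pvKeep, hx]
      · have hl' : (b :: rest').getLast? = some m := by simpa using hl
        have hrec := ih x m hp.of_cons hl'
        have hne : PySem.List.insertBy (fun a b => decide (a.2 < b.2)) x (b :: rest') ≠ [] := by
          rw [pvInsertBy_cons]; split <;> simp
        rcases List.exists_cons_of_ne_nil hne with ⟨c, cs, hc⟩
        rw [hc] at hrec
        rw [hc, List.getLast?_cons_cons]
        exact hrec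
-- last element of insertion-sorting t into sorted l
theorem pvSort_getLast? (t : List (String × Int)) :
    ∀ (l : List (String × Int)) (m : String × Int),
    (PySem.List.sorted l (fun p => p.2)).getLast? = some m →
    (List.foldl (fun acc x => PySem.List.insertBy (fun a b => decide (a.2 < b.2)) x acc)
        (PySem.List.sorted l (fun p => p.2)) t).getLast? = some (List.foldl pvKeep m t) := by
  induction t with
  | nil => intro l m hl; simpa using hl
  | cons x t ih =>
    intro l m hl
    have hstep : PySem.List.insertBy (fun a b => decide (a.2 < b.2)) x (PySem.List.sorted l (fun p => p.2))
        = PySem.List.sorted (l ++ [x]) (fun p => p.2) := by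
      rw [PySem.List.sorted_eq_foldl_insertBy (l ++ [x]), List.foldl_append,
        ← PySem.List.sorted_eq_foldl_insertBy l]
      rfl
    have hlast : (PySem.List.sorted (l ++ [x]) (fun p => p.2)).getLast? = some (pvKeep m x) := by
      rw [← hstep]
      exact pvInsert_getLast? _ x m (PySem.List.sorted_pairwise l (fun p => p.2)) hl
    simpa [List.foldl_cons, hstep] using ih (l ++ [x]) (pvKeep m x) hlast

theorem pvSorted_cons_getLast? (p : String × Int) (t : List (String × Int)) :
    (PySem.List.sorted (p :: t) (fun q => q.2)).getLast? = some (List.foldl pvKeep p t) := by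
  have h1 : PySem.List.sorted (p :: t) (fun q => q.2)
      = List.foldl (fun acc x => PySem.List.insertBy (fun a b => decide (a.2 < b.2)) x acc)
          (PySem.List.sorted [p] (fun q => q.2)) t := by
    rw [PySem.List.sorted_eq_foldl_insertBy]
    rfl
  rw [h1]
  exact pvSort_getLast? t [p] p rfl

-- ===== VERDICT (by name: the statement is the Claim_ definition above) =====
theorem emp_month_spec : Claim_equal_emp_month := by
  intro tup _ hpre
  unfold Spec_emp_month
  rcases tup with _ | ⟨p, t⟩
  · exact absurd rfl hpre
  · unfold emp_month emp_month_alt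
    simp only [List.foldl_cons, if_pos, beq_self_eq_true, zero_add]
    rw [pvA_loop t 1 p.1 p.2 (by omega)]
    have hlast := pvSorted_cons_getLast? p t
    simp [PySem.List.pyGet?_neg_one, hlast]
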